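-- pv_equiv track=rewrite | github.com/ABHUU-afk/bhagavad-gita-numerology | app.py | calculate_numerology
-- ===== SOURCE A (Python) =====
-- VOWELS = set('AEIOUY')
--
-- LETTER_MAP = {
--     'A': 1, 'J': 1, 'S': 1,
--     'B': 2, 'K': 2, 'T': 2,
--     'C': 3, 'L': 3, 'U': 3,
--     'D': 4, 'M': 4, 'V': 4,
--     'E': 5, 'N': 5, 'W': 5,
--     'F': 6, 'O': 6, 'X': 6,
--     'G': 7, 'P': 7, 'Y': 7,
--     'H': 8, 'Q': 8, 'Z': 8,
--     'I': 9, 'R': 9,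
-- }
--
-- def reduce_number(value):
--     while value > 9 and value not in (11, 22, 33):
--         value = sum(int(digit) for digit in str(value))
--     return value
--
-- def letter_value(letter):
--     return LETTER_MAP.get(letter.upper(), 0)
--
-- def calculate_numerology(full_name):
--     letters = [ch for ch in full_name.upper() if ch.isalpha()]
--     expression = sum(letter_value(ch) for ch in letters)
--     soul = sum(letter_value(ch) for ch in letters if ch in VOWELS)
--     personality = sum(letter_value(ch) for ch in letters if ch not in VOWELS)
--     return {
--         'expression': reduce_number(expression) if expression else None,
--         'soul': reduce_number(soul) if soul else None,
--         'personality': reduce_number(personality) if personality else None,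
--         'expression_raw': expression,
--         'soul_raw': soul,
--         'personality_raw': personality,
--     }
-- ===== SOURCE B (Python) =====
-- VOWELS = set('AEIOUY')
--
-- LETTER_MAP = {
--     'A': 1, 'J': 1, 'S': 1,
--     'B': 2, 'K': 2, 'T': 2,
--     'C': 3, 'L': 3, 'U': 3,
--     'D': 4, 'M': 4, 'V': 4,
--     'E': 5, 'N': 5, 'W': 5,
--     'F': 6, 'O': 6, 'X': 6,
--     'G': 7, 'P': 7, 'Y': 7,
--     'H': 8, 'Q': 8, 'Z': 8,
--     'I': 9, 'R': 9,
-- }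
--
-- def reduce_number(value):
--     while value > 9 and value not in (11, 22, 33):
--         value = sum(int(digit) for digit in str(value))
--     return value
--
-- def letter_value(letter):
--     return LETTER_MAP.get(letter.upper(), 0)
--
-- def calculate_numerology(full_name):
--     # one pass: accumulate expression and soul; personality = expression - soul
--     expression = 0
--     soul = 0
--     for ch in full_name.upper():
--         if ch.isalpha():
--             v = letter_value(ch)
--             expression += v
--             if ch in VOWELS:
--                 soul += v
--     personality = expression - soul
--     return {
--         'expression': reduce_number(expression) if expression else None,
--         'soul': reduce_number(soul) if soul else None,
--         'personality': reduce_number(personality) if personality else None,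
--         'expression_raw': expression,
--         'soul_raw': soul,
--         'personality_raw': personality,
--     }
-- ===== Notes on version B (the rewrite author's own statement) =====
-- stated objective: faster
-- what changed: Replaces A's three separate generator-sum scans over the letter list with a single fused pass accumulating expression and soul, deriving personality algebraically as expression - soul since vowels and consonants partition the letters.
import Mathlib
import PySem

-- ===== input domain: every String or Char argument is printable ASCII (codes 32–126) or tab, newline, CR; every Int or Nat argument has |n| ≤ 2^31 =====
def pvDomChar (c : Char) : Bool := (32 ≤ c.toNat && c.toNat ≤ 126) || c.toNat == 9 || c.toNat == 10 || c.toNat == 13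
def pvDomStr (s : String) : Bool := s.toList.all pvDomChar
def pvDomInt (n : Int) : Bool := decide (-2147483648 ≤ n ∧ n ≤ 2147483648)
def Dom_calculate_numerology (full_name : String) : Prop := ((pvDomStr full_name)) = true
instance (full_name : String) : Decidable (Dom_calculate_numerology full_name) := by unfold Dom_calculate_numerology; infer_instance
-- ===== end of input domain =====

-- B fuses A's three sum-scans into one pass (expression, soul) and derives personality = expression - soul.


-- ===== PORT A =====
-- shared module helpers (identical source text in Source A and Source B)

-- VOWELS = set('AEIOUY')
def pvVowels : PySem.Set Char := PySem.Set.ofList ['A', 'E', 'I', 'O', 'U', 'Y']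

-- LETTER_MAP
def pvLetterMap : PySem.Dict Char Int := PySem.Dict.ofList
  [('A', 1), ('J', 1), ('S', 1),
   ('B', 2), ('K', 2), ('T', 2),
   ('C', 3), ('L', 3), ('U', 3),
   ('D', 4), ('M', 4), ('V', 4),
   ('E', 5), ('N', 5), ('W', 5),
   ('F', 6), ('O', 6), ('X', 6),
   ('G', 7), ('P', 7), ('Y', 7),
   ('H', 8), ('Q', 8), ('Z', 8),
   ('I', 9), ('R', 9)]

-- sum(int(digit) for digit in str(value)); exact for the calls made (value > 9, so digits only)
def pvDigitSum (value : Int) : Int :=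
  ((PySem.Int.toChars value).map (fun d => ((d.toNat : Int) - 48))).sum

-- reduce_number's while loop, with fuel making the recursion total (the digit sum of
-- value > 9 is strictly smaller, so value.toNat steps always suffice)
def reduce_number_loop : Nat → Int → Int
  | 0, value => value
  | fuel + 1, value =>
    if value > 9 ∧ ¬(value = 11 ∨ value = 22 ∨ value = 33) then
      reduce_number_loop fuel (pvDigitSum value)
    else value

def reduce_number (value : Int) : Int := reduce_number_loop value.toNat value

def letter_value (letter : Char) : Int := pvLetterMap.getD (PySem.Chars.upperChar letter) 0

def calculate_numerology (full_name : String) : List (String × Option Int) :=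
  let letters := (PySem.Str.upper full_name).toList.filter (fun ch => PySem.Chars.isalpha ch)
  let expression := (letters.map (fun ch => letter_value ch)).sum
  let soul := ((letters.filter (fun ch => pvVowels.contains ch)).map (fun ch => letter_value ch)).sum
  let personality := ((letters.filter (fun ch => !(pvVowels.contains ch))).map (fun ch => letter_value ch)).sum
  [("expression", if expression ≠ 0 then some (reduce_number expression) else none),
   ("soul", if soul ≠ 0 then some (reduce_number soul) else none),
   ("personality", if personality ≠ 0 then some (reduce_number personality) else none),
   ("expression_raw", some expression),
   ("soul_raw", some soul),
   ("personality_raw", some personality)]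

-- ===== PORT B =====
-- the for-loop of Source B: one pass accumulating (expression, soul)
def pvAccumulate (acc : Int × Int) (ch : Char) : Int × Int :=
  if PySem.Chars.isalpha ch then
    let v := letter_value ch
    (acc.1 + v, if pvVowels.contains ch then acc.2 + v else acc.2)
  else acc

def calculate_numerology_alt (full_name : String) : List (String × Option Int) :=
  let es := (PySem.Str.upper full_name).toList.foldl pvAccumulate (0, 0)
  let expression := es.1
  let soul := es.2
  let personality := expression - soul
  [("expression", if expression ≠ 0 then some (reduce_number expression) else none),
   ("soul", if soul ≠ 0 then some (reduce_number soul) else none),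
   ("personality", if personality ≠ 0 then some (reduce_number personality) else none),
   ("expression_raw", some expression),
   ("soul_raw", some soul),
   ("personality_raw", some personality)]

-- ===== PRECONDITION & SPEC =====
def Spec_calculate_numerology (full_name : String) (out : List (String × Option Int)) : Prop := out = calculate_numerology_alt full_name
instance (full_name : String) (out : List (String × Option Int)) : Decidable (Spec_calculate_numerology full_name out) := by unfold Spec_calculate_numerology; infer_instance

-- ===== CLAIM (what is proved, stated in full; the proofs are below) =====
def Claim_equal_calculate_numerology : Prop := ∀ (full_name : String), Dom_calculate_numerology full_name → Spec_calculate_numerology full_name (calculate_numerology full_name)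

-- ===== LEMMAS AND PROOFS =====

-- the fused fold splits into A's expression sum and soul sum
lemma pvAccumulate_spec (l : List Char) (e s : Int) :
    l.foldl pvAccumulate (e, s) =
      (e + ((l.filter (fun ch => PySem.Chars.isalpha ch)).map (fun ch => letter_value ch)).sum,
       s + (((l.filter (fun ch => PySem.Chars.isalpha ch)).filter (fun ch => pvVowels.contains ch)).map
              (fun ch => letter_value ch)).sum) := by
  induction l generalizing e s with
  | nil => simp
  | cons c t ih =>
    simp only [List.foldl_cons, pvAccumulate]
    by_cases ha : PySem.Chars.isalpha c = true
    · by_cases hv : pvVowels.contains c = true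
      · simp only [ha, hv, if_true, ih, List.filter_cons, List.map_cons, List.sum_cons,
          Prod.mk.injEq]
        constructor <;> ring
      · simp only [ha, hv, if_true, if_false, ih, List.filter_cons, List.map_cons,
          List.sum_cons, Bool.false_eq_true, Prod.mk.injEq]
        exact ⟨by ring, trivial⟩
    · simp only [ha, if_false, ih, List.filter_cons, Bool.false_eq_true]

-- vowels and non-vowels partition the letters: the two partial sums add up to the total
lemma pv_partition (l : List Char) :
    ((l.filter (fun ch => pvVowels.contains ch)).map (fun ch => letter_value ch)).sum +
    ((l.filter (fun ch => !(pvVowels.contains ch))).map (fun ch => letter_value ch)).sum =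
    (l.map (fun ch => letter_value ch)).sum := by
  induction l with
  | nil => simp
  | cons c t ih =>
    by_cases hv : pvVowels.contains c = true <;>
      simp only [List.filter_cons, hv, Bool.not_true, Bool.not_false, if_true, if_false,
        Bool.false_eq_true, List.map_cons, List.sum_cons] <;> omega

-- ===== VERDICT (by name: the statement is the Claim_ definition above) =====
theorem calculate_numerology_spec : Claim_equal_calculate_numerology := by
  intro full_name _
  unfold Spec_calculate_numerology calculate_numerology calculate_numerology_alt
  rw [pvAccumulate_spec]
  simp only [zero_add]
  have h := pv_partition ((PySem.Str.upper full_name).toList.filter (fun ch => PySem.Chars.isalpha ch))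
  set E := (((PySem.Str.upper full_name).toList.filter (fun ch => PySem.Chars.isalpha ch)).map
      (fun ch => letter_value ch)).sum with hE
  set S := ((((PySem.Str.upper full_name).toList.filter (fun ch => PySem.Chars.isalpha ch)).filter
      (fun ch => pvVowels.contains ch)).map (fun ch => letter_value ch)).sum with hS
  set P := ((((PySem.Str.upper full_name).toList.filter (fun ch => PySem.Chars.isalpha ch)).filter
      (fun ch => !(pvVowels.contains ch))).map (fun ch => letter_value ch)).sum with hP
  rw [show P = E - S from by omega]
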